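-- pv_equiv track=rewrite | github.com/Tobolov/animated-motd-generator | magic-generator.py | prime_larger_than
-- ===== SOURCE A (Python) =====
-- def check_prime(sieve, num: int):
--     while (num):
--         if (sieve[num] == False):
--             return False
--         num = int(num / 10)
--     return True
--
-- def prime_larger_than(n: int):
--     sieve = [True for i in range(n * 10 + 1)]
--     sieve[0] = False
--     sieve[1] = False
--     for i in range(2, n * 10 + 1):
--         if (sieve[i]):
--             for j in range(i * i, n * 10 + 1, i):
--                 sieve[j] = False
--     while (True):
--         if (check_prime(sieve, n)):
--             return n
--             break
--         else:
--             n += 1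
-- ===== SOURCE B (Python) =====
-- def prime_larger_than(n):
--     def is_prime(m):
--         if m < 2:
--             return False
--         if m < 4:
--             return True
--         if m % 2 == 0:
--             return False
--         d = 3
--         while d * d <= m:
--             if m % d == 0:
--                 return False
--             d += 2
--         return True
--
--     def chain_prime(m):
--         # a right-truncatable prime: every decimal prefix is prime;
--         # testing the shortest prefix first rejects almost every candidate cheaply
--         if m == 0:
--             return True
--         return chain_prime(m // 10) and is_prime(m)
--
--     m = max(n, 2)
--     while not chain_prime(m):
--         m += 1
--     return m
-- ===== Notes on version B (the rewrite author's own statement) =====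
-- stated objective: faster
-- what changed: B drops A's per-call Sieve of Eratosthenes over [0,10n] and instead scans candidates m = max(n,2), max(n,2)+1, ..., testing each candidate's prefix chain shortest-prefix-first by trial division up to sqrt, so almost every candidate is rejected after a few tiny primality tests.
import Mathlib
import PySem

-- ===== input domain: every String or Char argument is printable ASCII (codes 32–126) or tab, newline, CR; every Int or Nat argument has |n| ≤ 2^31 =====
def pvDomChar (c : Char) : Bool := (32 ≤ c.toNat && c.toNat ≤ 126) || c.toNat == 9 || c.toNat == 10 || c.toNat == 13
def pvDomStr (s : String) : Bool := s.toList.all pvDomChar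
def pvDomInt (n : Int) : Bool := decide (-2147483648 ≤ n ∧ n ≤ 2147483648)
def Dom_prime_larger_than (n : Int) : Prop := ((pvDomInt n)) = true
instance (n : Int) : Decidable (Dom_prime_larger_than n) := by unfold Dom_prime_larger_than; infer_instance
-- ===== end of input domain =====

-- B replaces A's per-call Sieve of Eratosthenes over [0,10n] by trial division up to
-- sqrt(m) on each candidate's truncation chain (different algorithm; asymptotically less work).


-- ===== PORT A =====
-- inner loop `for j in range(i*i, n*10+1, i): sieve[j] = False` (the `0 < step` test is a totality guard only; step = i ≥ 2 at every call)
def pvMark (s : Array Bool) (j step N : Nat) : Array Bool :=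
  if _h : 0 < step ∧ j ≤ N then pvMark (s.setIfInBounds j false) (j + step) step N else s
termination_by N + 1 - j
decreasing_by omega

-- outer loop `for i in range(2, n*10+1): if sieve[i]: ...`
def pvSieve (s : Array Bool) (i N : Nat) : Array Bool :=
  if _h : i ≤ N then
    pvSieve (if s.getD i false then pvMark s (i * i) i N else s) (i + 1) N
  else s
termination_by N + 1 - i

-- `check_prime`; `int(num / 10)` equals num / 10 on Nat for every value reachable here (exact)
def pvCheckPrime (s : Array Bool) (num : Nat) : Bool :=
  if h : num = 0 then true
  else if s.getD num false = false then false
  else pvCheckPrime s (num / 10)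
termination_by num
decreasing_by exact Nat.div_lt_self (Nat.pos_of_ne_zero h) (by norm_num)

-- `while True: if check_prime(sieve, n): return n; else: n += 1` (fuel covers every input in Pre_)
def pvSearchA (s : Array Bool) : Nat → Nat → Nat
  | m, 0 => m
  | m, f + 1 => if pvCheckPrime s m then m else pvSearchA s (m + 1) f

def prime_larger_than (n : Int) : Int :=
  let N : Nat := (n * 10).toNat
  let s := pvSieve (((Array.replicate (N + 1) true).setIfInBounds 0 false).setIfInBounds 1 false) 2 N
  (pvSearchA s n.toNat (N + 2) : Nat)

-- ===== PORT B =====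
-- `while d*d <= m: if m % d == 0: return False; d += 2`
def pvTrialLoop (m d : Nat) : Bool :=
  if _h : d * d ≤ m then (if m % d = 0 then false else pvTrialLoop m (d + 2)) else true
termination_by m + 1 - d
decreasing_by
  have hd : d ≤ m := by nlinarith
  omega

def pvIsPrimeB (m : Nat) : Bool :=
  if m < 2 then false
  else if m < 4 then true
  else if m % 2 = 0 then false
  else pvTrialLoop m 3

-- `chain_prime` (tests the shortest prefix first)
def pvChainB (m : Nat) : Bool :=
  if h : m = 0 then true
  else pvChainB (m / 10) && pvIsPrimeB m
termination_by m
decreasing_by exact Nat.div_lt_self (Nat.pos_of_ne_zero h) (by norm_num)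

-- `m = max(n, 2); while not chain_prime(m): m += 1` (fuel covers every input in Pre_)
def pvSearchB : Nat → Nat → Nat
  | m, 0 => m
  | m, f + 1 => if pvChainB m then m else pvSearchB (m + 1) f

def prime_larger_than_alt (n : Int) : Int :=
  let m0 : Nat := max n.toNat 2
  (pvSearchB m0 (10 * m0) : Nat)

-- ===== PRECONDITION & SPEC =====
-- Pre_ excludes exactly the inputs on which A raises: n ≤ 0 (IndexError while initialising
-- the sieve) and n > 73939133 (there is no right-truncatable prime ≥ n, so A's search walks
-- past the end of its sieve and raises IndexError).
def Pre_prime_larger_than (n : Int) : Prop := 1 ≤ n ∧ n ≤ 73939133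
instance (n : Int) : Decidable (Pre_prime_larger_than n) := by unfold Pre_prime_larger_than; infer_instance
def pvWitness_prime_larger_than : Int := 7

def Spec_prime_larger_than (n : Int) (out : Int) : Prop := out = prime_larger_than_alt n
instance (n : Int) (out : Int) : Decidable (Spec_prime_larger_than n out) := by unfold Spec_prime_larger_than; infer_instance

-- ===== CLAIM (what is proved, stated in full; the proofs are below) =====
def Claim_equal_prime_larger_than : Prop := ∀ (n : Int), Dom_prime_larger_than n → Pre_prime_larger_than n → Spec_prime_larger_than n (prime_larger_than n)

-- ===== LEMMAS AND PROOFS =====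

-- semantic right-truncatable-prime test (Bool so that Nat.find applies)
def pvRTb (m : Nat) : Bool :=
  if h : m = 0 then true else decide (Nat.Prime m) && pvRTb (m / 10)
termination_by m
decreasing_by exact Nat.div_lt_self (Nat.pos_of_ne_zero h) (by norm_num)

-- ---- B-side: trial division computes primality ----
lemma trialLoop_spec (m : Nat) : ∀ k d, m + 1 - d ≤ k → d % 2 = 1 →
    (pvTrialLoop m d = true ↔ ∀ e, d ≤ e → e * e ≤ m → e % 2 = 1 → ¬ e ∣ m) := by
  intro k
  induction k with
  | zero =>
    intro d hk hd
    have hdd : d ≤ d * d := Nat.le_mul_of_pos_left d (by omega)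
    have hdm : ¬ d * d ≤ m := by omega
    rw [pvTrialLoop]
    simp only [dif_neg hdm, true_iff]
    intro e he hee hep hdvd
    have : d * d ≤ e * e := Nat.mul_le_mul he he
    omega
  | succ k ih =>
    intro d hk hd
    rw [pvTrialLoop]
    split_ifs with h1 h2
    · simp only [false_iff]
      intro hall
      exact hall d le_rfl h1 hd (Nat.dvd_of_mod_eq_zero h2)
    · rw [ih (d + 2) (by omega) (by omega)]
      constructor
      · intro hall e he hee hep hdvd
        rcases Nat.lt_or_ge e (d + 2) with hlt | hge
        · have : e = d ∨ e = d + 1 := by omega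
          rcases this with rfl | rfl
          · exact h2 (by rcases hdvd with ⟨c, rfl⟩; simp [Nat.mul_mod_right])
          · omega
        · exact hall e hge hee hep hdvd
      · intro hall e he hee hep hdvd
        exact hall e (by omega) hee hep hdvd
    · simp only [true_iff]
      intro e he hee hep hdvd
      have : d * d ≤ e * e := Nat.mul_le_mul he he
      omega

lemma isPrimeB_eq (m : Nat) : pvIsPrimeB m = decide (Nat.Prime m) := by
  unfold pvIsPrimeB
  split_ifs with h1 h2 h3
  · interval_cases m <;> decide
  · interval_cases m <;> decide
  · have hnp : ¬ m.Prime := by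
      intro hp
      rcases (Nat.Prime.eq_one_or_self_of_dvd hp 2 (Nat.dvd_of_mod_eq_zero h3)) with h | h <;> omega
    simp [hnp]
  · have hm5 : 5 ≤ m := by omega
    have hodd : m % 2 = 1 := by omega
    have hiff := trialLoop_spec m (m + 1) 3 (by omega) (by norm_num)
    by_cases hp : m.Prime
    · simp only [hp, decide_true]
      rw [hiff]
      intro e he hee hep hdvd
      rcases (Nat.Prime.eq_one_or_self_of_dvd hp e hdvd) with h | h
      · omega
      · subst h; nlinarith
    · simp only [hp, decide_false]
      have hpf : (Nat.minFac m).Prime := Nat.minFac_prime (by omega)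
      have hdvd : Nat.minFac m ∣ m := Nat.minFac_dvd m
      have hsq : Nat.minFac m * Nat.minFac m ≤ m := by
        have h := Nat.minFac_sq_le_self (by omega) hp
        nlinarith [h]
      have hne2 : Nat.minFac m ≠ 2 := by
        intro h
        rw [h] at hdvd
        rcases hdvd with ⟨c, rfl⟩
        omega
      have hodd' : Nat.minFac m % 2 = 1 := Nat.odd_iff.mp (hpf.odd_of_ne_two hne2)
      have h3le : 3 ≤ Nat.minFac m := by have := hpf.two_le; omega
      cases hb : pvTrialLoop m 3 with
      | false => rfl
      | true => exact absurd hdvd ((hiff.mp hb) (Nat.minFac m) h3le hsq hodd')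

lemma chainB_eq (m : Nat) : pvChainB m = pvRTb m := by
  induction m using Nat.strong_induction_on with
  | _ m ih =>
    rw [pvChainB, pvRTb]
    by_cases h : m = 0
    · simp [h]
    · simp only [dif_neg h]
      rw [isPrimeB_eq, ih (m / 10) (Nat.div_lt_self (Nat.pos_of_ne_zero h) (by norm_num))]
      exact Bool.and_comm _ _

-- ---- A-side: the sieve computes primality ----
lemma pvMark_size_aux (step N : Nat) : ∀ c j (s : Array Bool), N + 1 - j ≤ c → (pvMark s j step N).size = s.size := by
  intro c
  induction c with
  | zero =>
    intro j s hc
    rw [pvMark, dif_neg (by omega)]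
  | succ c ih =>
    intro j s hc
    rw [pvMark]
    by_cases h : 0 < step ∧ j ≤ N
    · rw [dif_pos h, ih (j + step) _ (by omega), Array.size_setIfInBounds]
    · rw [dif_neg h]

lemma pvMark_size (s : Array Bool) (j step N : Nat) : (pvMark s j step N).size = s.size :=
  pvMark_size_aux step N (N + 1 - j) j s le_rfl

lemma pvMark_getD_aux (step N : Nat) : ∀ c j (s : Array Bool), N + 1 - j ≤ c →
    ∀ k, k < s.size →
      (pvMark s j step N).getD k false =
        if j ≤ k ∧ k ≤ N ∧ step ∣ (k - j) ∧ 0 < step then false else s.getD k false := by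
  intro c
  induction c with
  | zero =>
    intro j s hc k hk
    rw [pvMark, dif_neg (by omega), if_neg (by rintro ⟨h1, h2, _, h4⟩; omega)]
  | succ c ihc =>
    intro j s hc k hk
    rw [pvMark]
    by_cases h : 0 < step ∧ j ≤ N
    · rw [dif_pos h]
      rw [ihc (j + step) _ (by omega) k (by rw [Array.size_setIfInBounds]; exact hk)]
      by_cases hkj : k = j
      · subst hkj
        have hc1 : ¬ (k + step ≤ k ∧ k ≤ N ∧ step ∣ (k - (k + step)) ∧ 0 < step) := by
          rintro ⟨h1, _, _, h4⟩
          omega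
        have hc2 : (k ≤ k ∧ k ≤ N ∧ step ∣ (k - k) ∧ 0 < step) := by
          refine ⟨le_rfl, h.2, ?_, h.1⟩
          simp
        rw [if_neg hc1, if_pos hc2]
        rw [Array.getD_eq_getD_getElem?, Array.getElem?_setIfInBounds]
        simp [hk]
      · have hset : (s.setIfInBounds j false).getD k false = s.getD k false := by
          rw [Array.getD_eq_getD_getElem?, Array.getElem?_setIfInBounds, Array.getD_eq_getD_getElem?]
          simp [Ne.symm hkj]
        rw [hset]
        congr 1
        refine propext ⟨?_, ?_⟩
        · rintro ⟨h1, h2, ⟨d, hd⟩, h4⟩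
          refine ⟨by omega, h2, ⟨d + 1, ?_⟩, h4⟩
          have hmul : step * (d + 1) = step * d + step := by ring
          generalize hq : step * d = q at hd hmul
          omega
        · rintro ⟨h1, h2, ⟨d, hd⟩, h4⟩
          cases d with
          | zero => omega
          | succ d' =>
            have hmul : step * (d' + 1) = step * d' + step := by ring
            refine ⟨?_, h2, ⟨d', ?_⟩, h4⟩
            · generalize hq : step * d' = q at hd hmul
              omega
            · generalize hq : step * d' = q at hd hmul ⊢
              omega
    · rw [dif_neg h, if_neg (by rintro ⟨h1, h2, _, h4⟩; exact h ⟨h4, by omega⟩)]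

lemma pvMark_getD (s : Array Bool) (j step N : Nat) :
    ∀ k, k < s.size →
      (pvMark s j step N).getD k false =
        if j ≤ k ∧ k ≤ N ∧ step ∣ (k - j) ∧ 0 < step then false else s.getD k false :=
  pvMark_getD_aux step N (N + 1 - j) j s le_rfl

def SInv (N i : Nat) (s : Array Bool) : Prop :=
  s.size = N + 1 ∧ ∀ k, k ≤ N →
    (s.getD k false = false ↔ (k < 2 ∨ ∃ p, Nat.Prime p ∧ p < i ∧ p * p ≤ k ∧ p ∣ k))

lemma sInv_prime_at (N i : Nat) (s : Array Bool) (h : SInv N i s) (hi2 : 2 ≤ i) (hiN : i ≤ N) :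
    s.getD i false = decide (Nat.Prime i) := by
  have hk := h.2 i hiN
  by_cases hp : i.Prime
  · simp only [hp, decide_true]
    cases hb : s.getD i false with
    | true => rfl
    | false =>
      exfalso
      rcases hk.mp hb with hlt | ⟨p, hpp, hpi, hsq, hdvd⟩
      · omega
      · rcases Nat.Prime.eq_one_or_self_of_dvd hp p hdvd with h1 | h1
        · have := hpp.two_le; omega
        · omega
  · simp only [hp, decide_false]
    apply hk.mpr
    right
    have hpos : 0 < i := by omega
    have hpf : (Nat.minFac i).Prime := Nat.minFac_prime (by omega)
    refine ⟨i.minFac, hpf, ?_, ?_, Nat.minFac_dvd i⟩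
    · have hle : i.minFac ≤ i := Nat.le_of_dvd hpos (Nat.minFac_dvd i)
      have hne : i.minFac ≠ i := by
        intro he
        exact hp (Nat.prime_def_minFac.mpr ⟨hi2, he⟩)
      omega
    · have h := Nat.minFac_sq_le_self hpos hp
      nlinarith [h]

lemma sieve_inv_step (N i : Nat) (s : Array Bool) (h : SInv N i s) (hi2 : 2 ≤ i) (hiN : i ≤ N) :
    SInv N (i + 1) (if s.getD i false then pvMark s (i * i) i N else s) := by
  have hprime := sInv_prime_at N i s h hi2 hiN
  cases hb : s.getD i false with
  | true =>
    have hip : i.Prime := by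
      rw [hb] at hprime
      exact of_decide_eq_true hprime.symm
    simp only [if_true]
    constructor
    · rw [pvMark_size, h.1]
    · intro k hkN
      have hks : k < s.size := by rw [h.1]; omega
      rw [pvMark_getD s (i * i) i N k hks]
      by_cases hc : i * i ≤ k ∧ k ≤ N ∧ i ∣ (k - i * i) ∧ 0 < i
      · rw [if_pos hc]
        simp only [true_iff]
        right
        refine ⟨i, hip, by omega, hc.1, ?_⟩
        have hdd : i ∣ i * i := Dvd.intro i rfl
        have : k = (k - i * i) + i * i := by omega
        rw [this]
        exact Nat.dvd_add hc.2.2.1 hdd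
      · rw [if_neg hc]
        rw [h.2 k hkN]
        constructor
        · rintro (h1 | ⟨p, hpp, hpi, hsq, hdvd⟩)
          · exact Or.inl h1
          · exact Or.inr ⟨p, hpp, by omega, hsq, hdvd⟩
        · rintro (h1 | ⟨p, hpp, hpi, hsq, hdvd⟩)
          · exact Or.inl h1
          · rcases Nat.lt_or_ge p i with hpi' | hpi'
            · exact Or.inr ⟨p, hpp, hpi', hsq, hdvd⟩
            · exfalso
              have hpe : p = i := by omega
              subst hpe
              apply hc
              refine ⟨hsq, hkN, Nat.dvd_sub hdvd (Dvd.intro p rfl), by omega⟩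
  | false =>
    have hinp : ¬ i.Prime := by
      rw [hb] at hprime
      intro hp
      simp [hp] at hprime
    rw [if_neg (by simp)]
    constructor
    · exact h.1
    · intro k hkN
      rw [h.2 k hkN]
      constructor
      · rintro (h1 | ⟨p, hpp, hpi, hsq, hdvd⟩)
        · exact Or.inl h1
        · exact Or.inr ⟨p, hpp, by omega, hsq, hdvd⟩
      · rintro (h1 | ⟨p, hpp, hpi, hsq, hdvd⟩)
        · exact Or.inl h1
        · rcases Nat.lt_or_ge p i with hpi' | hpi'
          · exact Or.inr ⟨p, hpp, hpi', hsq, hdvd⟩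
          · exfalso
            have : p = i := by omega
            subst this
            exact hinp hpp

lemma sieve_loop_inv_aux (N : Nat) : ∀ c i (s : Array Bool), N + 1 - i ≤ c → 2 ≤ i → SInv N i s →
    ∀ k, k ≤ N →
      ((pvSieve s i N).getD k false = false ↔
        (k < 2 ∨ ∃ p, Nat.Prime p ∧ p * p ≤ k ∧ p ∣ k)) := by
  intro c
  induction c with
  | zero =>
    intro i s hc hi2 hinv k hkN
    rw [pvSieve, dif_neg (by omega)]
    rw [hinv.2 k hkN]
    constructor
    · rintro (h1 | ⟨p, hpp, hpi, hsq, hdvd⟩)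
      · exact Or.inl h1
      · exact Or.inr ⟨p, hpp, hsq, hdvd⟩
    · rintro (h1 | ⟨p, hpp, hsq, hdvd⟩)
      · exact Or.inl h1
      · have hp2 := hpp.two_le
        have hple : p ≤ p * p := Nat.le_mul_of_pos_left p (by omega)
        exact Or.inr ⟨p, hpp, by omega, hsq, hdvd⟩
  | succ c ihc =>
    intro i s hc hi2 hinv k hkN
    rw [pvSieve]
    by_cases h : i ≤ N
    · rw [dif_pos h]
      exact ihc (i + 1) _ (by omega) (by omega) (sieve_inv_step N i s hinv hi2 h) k hkN
    · rw [dif_neg h]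
      rw [hinv.2 k hkN]
      constructor
      · rintro (h1 | ⟨p, hpp, hpi, hsq, hdvd⟩)
        · exact Or.inl h1
        · exact Or.inr ⟨p, hpp, hsq, hdvd⟩
      · rintro (h1 | ⟨p, hpp, hsq, hdvd⟩)
        · exact Or.inl h1
        · have hp2 := hpp.two_le
          have hple : p ≤ p * p := Nat.le_mul_of_pos_left p (by omega)
          exact Or.inr ⟨p, hpp, by omega, hsq, hdvd⟩

lemma sieve_loop_inv (s : Array Bool) (i N : Nat) (hi2 : 2 ≤ i) (hinv : SInv N i s) :
    ∀ k, k ≤ N →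
      ((pvSieve s i N).getD k false = false ↔
        (k < 2 ∨ ∃ p, Nat.Prime p ∧ p * p ≤ k ∧ p ∣ k)) :=
  sieve_loop_inv_aux N (N + 1 - i) i s le_rfl hi2 hinv

lemma sieve_init (N : Nat) (h1 : 1 ≤ N) :
    SInv N 2 (((Array.replicate (N + 1) true).setIfInBounds 0 false).setIfInBounds 1 false) := by
  constructor
  · simp
  · intro k hkN
    have hgd : (((Array.replicate (N + 1) true).setIfInBounds 0 false).setIfInBounds 1 false).getD k false
        = if k < 2 then false else true := by
      rw [Array.getD_eq_getD_getElem?, Array.getElem?_setIfInBounds, Array.getElem?_setIfInBounds,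
        Array.getElem?_replicate]
      simp only [Array.size_setIfInBounds, Array.size_replicate]
      rcases show k = 0 ∨ k = 1 ∨ 2 ≤ k by omega with rfl | rfl | hk2
      · rw [if_neg (by omega), if_pos rfl, if_pos (by omega), if_pos (by omega)]
        rfl
      · rw [if_pos rfl, if_pos (by omega), if_pos (by omega)]
        rfl
      · rw [if_neg (by omega), if_neg (by omega), if_pos (by omega), if_neg (by omega)]
        rfl
    rw [hgd]
    rcases Nat.lt_or_ge k 2 with hk2 | hk2
    · simp [hk2]
    · rw [if_neg (by omega)]
      constructor
      · intro h; simp at h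
      · rintro (h | ⟨p, hpp, hpi, _, _⟩)
        · omega
        · have := hpp.two_le; omega

lemma sieve_final (N : Nat) (h1 : 1 ≤ N) :
    ∀ k, k ≤ N →
      (pvSieve (((Array.replicate (N + 1) true).setIfInBounds 0 false).setIfInBounds 1 false) 2 N).getD k false
        = decide (Nat.Prime k) := by
  intro k hkN
  have hiff := sieve_loop_inv _ 2 N le_rfl (sieve_init N h1) k hkN
  by_cases hp : k.Prime
  · simp only [hp, decide_true]
    cases hb : (pvSieve _ 2 N).getD k false with
    | true => rfl
    | false =>
      exfalso
      rcases hiff.mp hb with h2 | ⟨p, hpp, hsq, hdvd⟩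
      · have := hp.two_le; omega
      · rcases Nat.Prime.eq_one_or_self_of_dvd hp p hdvd with he | he
        · have := hpp.two_le; omega
        · subst he
          have := hp.two_le
          nlinarith
  · simp only [hp, decide_false]
    apply hiff.mpr
    rcases Nat.lt_or_ge k 2 with hk2 | hk2
    · exact Or.inl hk2
    · right
      have hpf : (Nat.minFac k).Prime := Nat.minFac_prime (by omega)
      refine ⟨k.minFac, hpf, ?_, Nat.minFac_dvd k⟩
      have h := Nat.minFac_sq_le_self (by omega) hp
      nlinarith [h]

-- ---- check_prime over a correct sieve computes pvRTb ----
lemma checkPrime_eq (N : Nat) (s : Array Bool)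
    (hs : ∀ k, k ≤ N → s.getD k false = decide (Nat.Prime k)) :
    ∀ m, m ≤ N → pvCheckPrime s m = pvRTb m := by
  intro m
  induction m using Nat.strong_induction_on with
  | _ m ih =>
    intro hm
    rw [pvCheckPrime, pvRTb]
    by_cases h : m = 0
    · simp [h]
    · simp only [dif_neg h]
      rw [hs m hm]
      by_cases hp : m.Prime
      · simp only [hp, decide_true]
        rw [if_neg (by simp)]
        simp only [Bool.true_and]
        exact ih (m / 10) (Nat.div_lt_self (Nat.pos_of_ne_zero h) (by norm_num))
          (le_trans (Nat.div_le_self m 10) hm)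
      · simp [hp]

-- ---- the two search loops return the least hit ----
lemma searchA_spec (s : Array Bool) : ∀ f m t, m ≤ t → t < m + f → pvCheckPrime s t = true →
    (∀ k, m ≤ k → k < t → pvCheckPrime s k = false) → pvSearchA s m f = t := by
  intro f
  induction f with
  | zero => intro m t h1 h2 _ _; omega
  | succ f ih =>
    intro m t h1 h2 ht hmin
    by_cases hm : m = t
    · subst hm
      simp [pvSearchA, ht]
    · have hlt : m < t := by omega
      have hfalse : pvCheckPrime s m = false := hmin m le_rfl hlt
      simp only [pvSearchA, hfalse]
      rw [if_neg (by simp)]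
      exact ih (m + 1) t (by omega) (by omega) ht (fun k hk1 hk2 => hmin k (by omega) hk2)

lemma searchB_spec : ∀ f m t, m ≤ t → t < m + f → pvChainB t = true →
    (∀ k, m ≤ k → k < t → pvChainB k = false) → pvSearchB m f = t := by
  intro f
  induction f with
  | zero => intro m t h1 h2 _ _; omega
  | succ f ih =>
    intro m t h1 h2 ht hmin
    by_cases hm : m = t
    · subst hm
      simp [pvSearchB, ht]
    · have hlt : m < t := by omega
      have hfalse : pvChainB m = false := hmin m le_rfl hlt
      simp only [pvSearchB, hfalse]
      rw [if_neg (by simp)]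
      exact ih (m + 1) t (by omega) (by omega) ht (fun k hk1 hk2 => hmin k (by omega) hk2)

-- ---- right-truncatable primes covering [1, 73939133] with ratio ≤ 10 ----
lemma rtb0 : pvRTb 0 = true := by rw [pvRTb]; simp

lemma rtb_step (m : Nat) (h1 : Nat.Prime m) (h2 : pvRTb (m / 10) = true) : pvRTb m = true := by
  rw [pvRTb]
  have h0 : m ≠ 0 := by have := h1.two_le; omega
  simp [h0, h1, h2]

lemma rtb2 : pvRTb 2 = true := rtb_step 2 (by norm_num) (by rw [show (2 : Nat) / 10 = 0 from rfl]; exact rtb0)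
lemma rtb29 : pvRTb 29 = true := rtb_step 29 (by norm_num) (by rw [show (29 : Nat) / 10 = 2 from rfl]; exact rtb2)
lemma rtb293 : pvRTb 293 = true := rtb_step 293 (by norm_num) (by rw [show (293 : Nat) / 10 = 29 from rfl]; exact rtb29)
lemma rtb2939 : pvRTb 2939 = true := rtb_step 2939 (by norm_num) (by rw [show (2939 : Nat) / 10 = 293 from rfl]; exact rtb293)
lemma rtb29399 : pvRTb 29399 = true := rtb_step 29399 (by norm_num) (by rw [show (29399 : Nat) / 10 = 2939 from rfl]; exact rtb2939)
lemma rtb293999 : pvRTb 293999 = true := rtb_step 293999 (by norm_num) (by rw [show (293999 : Nat) / 10 = 29399 from rfl]; exact rtb29399)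
lemma rtb2939999 : pvRTb 2939999 = true := rtb_step 2939999 (by norm_num) (by rw [show (2939999 : Nat) / 10 = 293999 from rfl]; exact rtb293999)
lemma rtb29399999 : pvRTb 29399999 = true := rtb_step 29399999 (by norm_num) (by rw [show (29399999 : Nat) / 10 = 2939999 from rfl]; exact rtb2939999)
lemma rtb7 : pvRTb 7 = true := rtb_step 7 (by norm_num) (by rw [show (7 : Nat) / 10 = 0 from rfl]; exact rtb0)
lemma rtb73 : pvRTb 73 = true := rtb_step 73 (by norm_num) (by rw [show (73 : Nat) / 10 = 7 from rfl]; exact rtb7)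
lemma rtb739 : pvRTb 739 = true := rtb_step 739 (by norm_num) (by rw [show (739 : Nat) / 10 = 73 from rfl]; exact rtb73)
lemma rtb7393 : pvRTb 7393 = true := rtb_step 7393 (by norm_num) (by rw [show (7393 : Nat) / 10 = 739 from rfl]; exact rtb739)
lemma rtb73939 : pvRTb 73939 = true := rtb_step 73939 (by norm_num) (by rw [show (73939 : Nat) / 10 = 7393 from rfl]; exact rtb7393)
lemma rtb739391 : pvRTb 739391 = true := rtb_step 739391 (by norm_num) (by rw [show (739391 : Nat) / 10 = 73939 from rfl]; exact rtb73939)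
lemma rtb7393913 : pvRTb 7393913 = true := rtb_step 7393913 (by norm_num) (by rw [show (7393913 : Nat) / 10 = 739391 from rfl]; exact rtb739391)
lemma rtb73939133 : pvRTb 73939133 = true := rtb_step 73939133 (by norm_num) (by rw [show (73939133 : Nat) / 10 = 7393913 from rfl]; exact rtb7393913)

lemma cover (a : Nat) (h1 : 1 ≤ a) (h2 : a ≤ 73939133) :
    ∃ p, pvRTb p = true ∧ 2 ≤ p ∧ a ≤ p ∧ p ≤ 10 * a := by
  rcases Nat.lt_or_ge a 3 with h | _
  · exact ⟨2, rtb2, by omega, by omega, by omega⟩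
  rcases Nat.lt_or_ge a 30 with h | _
  · exact ⟨29, rtb29, by omega, by omega, by omega⟩
  rcases Nat.lt_or_ge a 294 with h | _
  · exact ⟨293, rtb293, by omega, by omega, by omega⟩
  rcases Nat.lt_or_ge a 2940 with h | _
  · exact ⟨2939, rtb2939, by omega, by omega, by omega⟩
  rcases Nat.lt_or_ge a 29400 with h | _
  · exact ⟨29399, rtb29399, by omega, by omega, by omega⟩
  rcases Nat.lt_or_ge a 294000 with h | _
  · exact ⟨293999, rtb293999, by omega, by omega, by omega⟩
  rcases Nat.lt_or_ge a 2940000 with h | _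
  · exact ⟨2939999, rtb2939999, by omega, by omega, by omega⟩
  rcases Nat.lt_or_ge a 29400000 with h | _
  · exact ⟨29399999, rtb29399999, by omega, by omega, by omega⟩
  exact ⟨73939133, rtb73939133, by omega, by omega, by omega⟩

lemma chainB_one : pvChainB 1 = false := by
  rw [pvChainB]
  simp [pvIsPrimeB]

-- ===== VERDICT (by name: the statement is the Claim_ definition above) =====
theorem prime_larger_than_spec : Claim_equal_prime_larger_than := by
  intro n _hdom hpre
  obtain ⟨hn1, hn2⟩ := hpre
  unfold Spec_prime_larger_than prime_larger_than prime_larger_than_alt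
  have ha1 : 1 ≤ n.toNat := by omega
  have ha2 : n.toNat ≤ 73939133 := by omega
  have hN : (n * 10).toNat = 10 * n.toNat := by omega
  show ((pvSearchA (pvSieve (((Array.replicate ((n * 10).toNat + 1) true).setIfInBounds 0 false).setIfInBounds 1 false) 2 (n * 10).toNat) n.toNat ((n * 10).toNat + 2) : Nat) : Int)
      = ((pvSearchB (max n.toNat 2) (10 * max n.toNat 2) : Nat) : Int)
  rw [hN]
  have hN1 : 1 ≤ 10 * n.toNat := by omega
  have hsv := sieve_final (10 * n.toNat) hN1
  obtain ⟨p, hrt, hp2, hap, hp10⟩ := cover n.toNat ha1 ha2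
  have hpm0 : max n.toNat 2 ≤ p := by omega
  have hex : ∃ j, pvChainB (max n.toNat 2 + j) = true := by
    refine ⟨p - max n.toNat 2, ?_⟩
    rw [chainB_eq, show max n.toNat 2 + (p - max n.toNat 2) = p from by omega]
    exact hrt
  have hct : pvChainB (max n.toNat 2 + Nat.find hex) = true := Nat.find_spec hex
  have hmin : ∀ k, max n.toNat 2 ≤ k → k < max n.toNat 2 + Nat.find hex → pvChainB k = false := by
    intro k hk1 hk2
    have hm := Nat.find_min hex (m := k - max n.toNat 2) (by omega)
    rw [show max n.toNat 2 + (k - max n.toNat 2) = k from by omega] at hm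
    exact Bool.eq_false_iff.mpr hm
  have htp : max n.toNat 2 + Nat.find hex ≤ p := by
    have : Nat.find hex ≤ p - max n.toNat 2 := by
      apply Nat.find_min'
      rw [chainB_eq, show max n.toNat 2 + (p - max n.toNat 2) = p from by omega]
      exact hrt
    omega
  have htN : max n.toNat 2 + Nat.find hex ≤ 10 * n.toNat := by omega
  have hagree : ∀ k, k ≤ 10 * n.toNat →
      pvCheckPrime (pvSieve (((Array.replicate (10 * n.toNat + 1) true).setIfInBounds 0 false).setIfInBounds 1 false) 2 (10 * n.toNat)) k = pvChainB k := by
    intro k hk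
    rw [checkPrime_eq (10 * n.toNat) _ hsv k hk, chainB_eq]
  have hB : pvSearchB (max n.toNat 2) (10 * max n.toNat 2) = max n.toNat 2 + Nat.find hex := by
    apply searchB_spec _ _ _ (by omega) (by omega) hct hmin
  have hA : pvSearchA (pvSieve (((Array.replicate (10 * n.toNat + 1) true).setIfInBounds 0 false).setIfInBounds 1 false) 2 (10 * n.toNat)) n.toNat (10 * n.toNat + 2) = max n.toNat 2 + Nat.find hex := by
    apply searchA_spec _ _ _ _ (by omega) (by omega) (by rw [hagree _ htN]; exact hct)
    intro k hk1 hk2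
    rw [hagree k (by omega)]
    rcases Nat.lt_or_ge k (max n.toNat 2) with hlt | hge
    · have hk1' : k = 1 := by omega
      subst hk1'
      exact chainB_one
    · exact hmin k hge hk2
  rw [hA, hB]
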